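-- pv_equiv track=rewrite | github.com/gregory798/pythonMBFA | functions.py | flechettes
-- ===== SOURCE A (Python) =====
-- def flechettes(nb_tirs, somme):
--     choices = ""
--     for x in range(nb_tirs):
--         for y in range(nb_tirs):
--             if 50*x+20*y == somme and x+y<=nb_tirs:
--                 z = 10-x-y
--                 choices += "[50] " * x + "[20] " * y + "[0] " * z + f"<-- SOMME = {somme} <br>"
--     return choices
-- ===== SOURCE B (Python) =====
-- def flechettes(nb_tirs, somme):
--     parts = []
--     for x in range(nb_tirs):
--         r = somme - 50 * x
--         y = r // 20
--         if r >= 0 and r % 20 == 0 and y < nb_tirs and x + y <= nb_tirs: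
--             parts.append("[50] " * x + "[20] " * y + "[0] " * (10 - x - y) + f"<-- SOMME = {somme} <br>")
--     return "".join(parts)
-- ===== Notes on version B (the rewrite author's own statement) =====
-- stated objective: faster
-- what changed: Replaces the nested scan over all (x,y) pairs by a single pass over x that computes the unique candidate y=(somme-50x)//20 via divisibility and bound checks, collecting pieces in a list joined at the end.
import Mathlib
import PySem

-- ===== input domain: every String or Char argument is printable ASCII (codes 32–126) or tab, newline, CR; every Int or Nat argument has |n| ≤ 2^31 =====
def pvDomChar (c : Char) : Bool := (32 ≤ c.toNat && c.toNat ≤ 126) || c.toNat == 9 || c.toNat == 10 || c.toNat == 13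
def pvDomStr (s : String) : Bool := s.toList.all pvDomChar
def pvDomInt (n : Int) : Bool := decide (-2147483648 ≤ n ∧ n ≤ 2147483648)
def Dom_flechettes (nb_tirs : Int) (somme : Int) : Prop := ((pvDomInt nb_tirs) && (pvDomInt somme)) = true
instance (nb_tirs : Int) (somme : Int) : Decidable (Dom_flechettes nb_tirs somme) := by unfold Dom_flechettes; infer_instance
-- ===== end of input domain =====

-- B replaces A's nested O(n^2) scan over all (x,y) pairs by one pass over x that
-- derives the unique candidate y = (somme-50x)//20 by a divisibility check (faster, asymptotic).

-- shared helper: Python "s" * n (negative n gives ""); exact via PySem.List.pyRepeat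
def strMul (s : String) (n : Int) : String := String.ofList (PySem.List.pyRepeat s.toList n)

-- shared helper: the appended line "[50] "*x + "[20] "*y + "[0] "*(10-x-y) + f"<-- SOMME = {somme} <br>"
def pieceStr (somme x y : Int) : String :=
  strMul "[50] " x ++ strMul "[20] " y ++ strMul "[0] " (10 - x - y) ++
    ("<-- SOMME = " ++ PySem.Int.toStr somme ++ " <br>")

-- ===== PORT A =====
def flechettes (nb_tirs : Int) (somme : Int) : String :=
  (PySem.List.pyRange 0 nb_tirs 1).foldl (fun choices x =>
    (PySem.List.pyRange 0 nb_tirs 1).foldl (fun choices y =>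
      if 50 * x + 20 * y = somme ∧ x + y ≤ nb_tirs then
        choices ++ pieceStr somme x y
      else choices) choices) ""

-- ===== PORT B =====
def flechettes_alt (nb_tirs : Int) (somme : Int) : String :=
  String.join ((PySem.List.pyRange 0 nb_tirs 1).foldl (fun parts x =>
    let r := somme - 50 * x
    let y := PySem.Int.floordiv r 20
    if 0 ≤ r ∧ PySem.Int.mod r 20 = 0 ∧ y < nb_tirs ∧ x + y ≤ nb_tirs then
      parts ++ [pieceStr somme x y]
    else parts) [])

-- ===== PRECONDITION & SPEC =====
def Spec_flechettes (nb_tirs : Int) (somme : Int) (out : String) : Prop := out = flechettes_alt nb_tirs somme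
instance (nb_tirs : Int) (somme : Int) (out : String) : Decidable (Spec_flechettes nb_tirs somme out) := by unfold Spec_flechettes; infer_instance

-- ===== CLAIM (what is proved, stated in full; the proofs are below) =====
def Claim_equal_flechettes : Prop := ∀ (nb_tirs : Int) (somme : Int), Dom_flechettes nb_tirs somme → Spec_flechettes nb_tirs somme (flechettes nb_tirs somme)

-- ===== LEMMAS AND PROOFS =====

-- Python // and % by 20 are Lean's ediv/emod (divisor positive), so omega can reason about them
theorem fdiv20 (r : Int) : Int.fdiv r 20 = r / 20 := by rw [Int.fdiv_eq_ediv]; simp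

theorem fmod20 (r : Int) : Int.fmod r 20 = r % 20 := by rw [Int.fmod_eq_emod]; simp

-- The inner y-loop of A appends pieceStr at most once: at y0 = (somme-50x) fdiv 20, iff that
-- y0 lies in [a, n) and satisfies A's test.
theorem inner_fold_eq (somme n x y0 : Int) (hy0 : y0 = PySem.Int.floordiv (somme - 50 * x) 20) :
    ∀ (k : Nat) (a : Int) (c : String), (n - a).toNat = k →
    (PySem.List.pyRange a n 1).foldl (fun c y =>
        if 50 * x + 20 * y = somme ∧ x + y ≤ n then c ++ pieceStr somme x y else c) c
      = c ++ (if 50 * x + 20 * y0 = somme ∧ a ≤ y0 ∧ y0 < n ∧ x + y0 ≤ n then pieceStr somme x y0 else "") := by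
  intro k
  induction k with
  | zero =>
    intro a c hk
    have hna : n ≤ a := by omega
    rw [PySem.List.pyRange_one_eq_nil hna]
    have : ¬ (50 * x + 20 * y0 = somme ∧ a ≤ y0 ∧ y0 < n ∧ x + y0 ≤ n) := by omega
    simp [this, List.foldl]
  | succ k ih =>
    intro a c hk
    have han : a < n := by omega
    rw [PySem.List.pyRange_one_cons han]
    simp only [List.foldl_cons]
    by_cases hP : 50 * x + 20 * a = somme ∧ x + a ≤ n
    · -- the test fires at y = a; then y0 = a and it cannot fire again
      have hy0a : y0 = a := by
        simp only [PySem.Int.floordiv] at hy0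
        rw [fdiv20] at hy0
        omega
      rw [if_pos hP, ih (a + 1) (c ++ pieceStr somme x a) (by omega)]
      have hno : ¬ (50 * x + 20 * y0 = somme ∧ a + 1 ≤ y0 ∧ y0 < n ∧ x + y0 ≤ n) := by omega
      have hyes : (50 * x + 20 * y0 = somme ∧ a ≤ y0 ∧ y0 < n ∧ x + y0 ≤ n) := by
        refine ⟨by omega, by omega, by omega, by omega⟩
      rw [if_neg hno, if_pos hyes, String.append_empty, hy0a]
    · rw [if_neg hP, ih (a + 1) c (by omega)]
      have hiff : (50 * x + 20 * y0 = somme ∧ a + 1 ≤ y0 ∧ y0 < n ∧ x + y0 ≤ n) ↔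
          (50 * x + 20 * y0 = somme ∧ a ≤ y0 ∧ y0 < n ∧ x + y0 ≤ n) := by
        constructor
        · rintro ⟨h1, h2, h3, h4⟩; exact ⟨h1, by omega, h3, h4⟩
        · rintro ⟨h1, h2, h3, h4⟩
          refine ⟨h1, ?_, h3, h4⟩
          by_cases hya : y0 = a
          · exact absurd ⟨by omega, by omega⟩ hP
          · omega
      rw [if_congr hiff rfl rfl]

-- A's test at the unique candidate y0 coincides with B's divisibility test.
theorem cond_equiv (somme n x : Int) :
    (50 * x + 20 * (PySem.Int.floordiv (somme - 50 * x) 20) = somme ∧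
     0 ≤ PySem.Int.floordiv (somme - 50 * x) 20 ∧
     PySem.Int.floordiv (somme - 50 * x) 20 < n ∧
     x + PySem.Int.floordiv (somme - 50 * x) 20 ≤ n) ↔
    (0 ≤ somme - 50 * x ∧ PySem.Int.mod (somme - 50 * x) 20 = 0 ∧
     PySem.Int.floordiv (somme - 50 * x) 20 < n ∧
     x + PySem.Int.floordiv (somme - 50 * x) 20 ≤ n) := by
  simp only [PySem.Int.floordiv, PySem.Int.mod, fdiv20, fmod20]
  omega

-- folding ++ over a list of strings is prepending to its join
theorem foldl_append_strings :
    ∀ (l : List String) (c : String),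
    l.foldl (fun r s => r ++ s) c = c ++ String.join l := by
  intro l
  induction l with
  | nil => intro c; rw [List.foldl_nil, String.join, List.foldl_nil, String.append_empty]
  | cons h t ih =>
    intro c
    have hj : String.join (h :: t) = h ++ String.join t := by
      rw [String.join, List.foldl_cons, String.empty_append, ih h]
    rw [List.foldl_cons, ih (c ++ h), hj, String.append_assoc]

-- folding '++ g x' over a list is joining the mapped list
theorem foldl_append_eq_join (g : Int → String) (l : List Int) (c : String) :
    l.foldl (fun c x => c ++ g x) c = c ++ String.join (l.map g) := by
  rw [← List.foldl_map]
  exact foldl_append_strings (l.map g) c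

-- empty pieces vanish under join
theorem join_ite_eq_join_filter (p : Int → Prop) [DecidablePred p] (f : Int → String) :
    ∀ (l : List Int),
    String.join (l.map (fun x => if p x then f x else "")) =
      String.join ((l.filter (fun x => decide (p x))).map f) := by
  intro l
  induction l with
  | nil => rfl
  | cons h t ih =>
    have hj : ∀ (s : String) (ts : List String), String.join (s :: ts) = s ++ String.join ts := by
      intro s ts
      rw [String.join, List.foldl_cons, String.empty_append, foldl_append_strings]
    by_cases hp : p h
    · simp only [List.map_cons, List.filter_cons, if_pos hp, decide_eq_true hp, if_true]
      rw [hj, hj, ih]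
    · simp only [List.map_cons, List.filter_cons, if_neg hp, decide_eq_false hp,
        Bool.false_eq_true, if_false]
      rw [hj, String.empty_append, ih]

-- ===== VERDICT (by name: the statement is the Claim_ definition above) =====
theorem flechettes_spec : Claim_equal_flechettes := by
  intro n somme _
  unfold Spec_flechettes flechettes flechettes_alt
  -- rewrite A's outer fold step using the inner-loop characterisation
  have hstep : (fun (choices : String) (x : Int) =>
      (PySem.List.pyRange 0 n 1).foldl (fun c y =>
        if 50 * x + 20 * y = somme ∧ x + y ≤ n then c ++ pieceStr somme x y else c) choices)
      = (fun (choices : String) (x : Int) =>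
        choices ++ (if 0 ≤ somme - 50 * x ∧ PySem.Int.mod (somme - 50 * x) 20 = 0 ∧
            PySem.Int.floordiv (somme - 50 * x) 20 < n ∧
            x + PySem.Int.floordiv (somme - 50 * x) 20 ≤ n then
          pieceStr somme x (PySem.Int.floordiv (somme - 50 * x) 20) else "")) := by
    funext choices x
    rw [inner_fold_eq somme n x _ rfl (n - 0).toNat 0 choices rfl,
      if_congr (cond_equiv somme n x) rfl rfl]
  rw [hstep, foldl_append_eq_join, String.empty_append, join_ite_eq_join_filter,
    PySem.List.foldl_append_ite (p := fun x => 0 ≤ somme - 50 * x ∧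
      PySem.Int.mod (somme - 50 * x) 20 = 0 ∧ PySem.Int.floordiv (somme - 50 * x) 20 < n ∧
      x + PySem.Int.floordiv (somme - 50 * x) 20 ≤ n)
      (f := fun x => pieceStr somme x (PySem.Int.floordiv (somme - 50 * x) 20))]
  simp
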